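-- pv_equiv track=rewrite | github.com/nealzh/python_ocr | captcha/src/CaptchaHandler.py | scan_interval
-- ===== SOURCE A (Python) =====
-- def scan_interval(line):
--
--     principal_component = []
--
--     group = []
--     index_group = []
--     start_status = False
--
--     for index in range(len(line)):
--         if line[index] == 0 and not start_status:
--             continue
--         elif line[index] == 0 and start_status:
--             principal_component.append((index_group, group))
--             group = []
--             index_group = []
--             start_status = False
--         elif line[index] != 0 and not start_status:
--             start_status = True
--             group.append(line[index])
--             index_group.append(index)
--         elif line[index] != 0 and start_status:
--             group.append(line[index])
--             index_group.append(index)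
--
--     return principal_component
-- ===== SOURCE B (Python) =====
-- def scan_interval(line):
--     result = []
--     prev = -1
--     for z in (i for i, v in enumerate(line) if v == 0):
--         if z - prev > 1:
--             result.append((list(range(prev + 1, z)), line[prev + 1:z]))
--         prev = z
--     return result
-- ===== Notes on version B (the rewrite author's own statement) =====
-- stated objective: alternative
-- what changed: B derives the answer from the zero positions: it iterates over the indices of zeros (filtered enumerate), keeping only the previous zero's index, and emits each gap wider than 1 as (range(prev+1,z), line[prev+1:z]) by index arithmetic and slicing; A instead runs a per-element four-branch mutable state machine accumulating each run value by value, with the trailing run dropped as leftover state.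
import Mathlib
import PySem

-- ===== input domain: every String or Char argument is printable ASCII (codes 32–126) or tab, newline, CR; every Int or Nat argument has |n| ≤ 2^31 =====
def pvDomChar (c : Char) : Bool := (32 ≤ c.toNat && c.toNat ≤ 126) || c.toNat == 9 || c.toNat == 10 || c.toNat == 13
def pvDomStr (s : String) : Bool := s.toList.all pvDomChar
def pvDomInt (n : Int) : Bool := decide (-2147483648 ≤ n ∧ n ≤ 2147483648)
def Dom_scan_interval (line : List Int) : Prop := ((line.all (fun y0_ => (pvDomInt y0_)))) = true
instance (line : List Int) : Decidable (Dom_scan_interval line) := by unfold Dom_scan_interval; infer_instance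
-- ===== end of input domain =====

-- B rebuilds each nonzero run from the positions of the zeros by index arithmetic and
-- slicing, instead of A's per-element mutable state machine (alternative); same value everywhere.

-- ===== PORT A =====
-- state = (principal_component, group, index_group, start_status); loop body of 'for index in range(len(line))'
def pvStepA (s : List (List Int × List Int) × List Int × List Int × Bool) (index : Int)
    (v : Int) : List (List Int × List Int) × List Int × List Int × Bool :=
  let (pc, group, index_group, start_status) := s
  if v == 0 && !start_status then s
  else if v == 0 && start_status then (pc ++ [(index_group, group)], [], [], false)
  else if v != 0 && !start_status then (pc, group ++ [v], index_group ++ [index], true)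
  else (pc, group ++ [v], index_group ++ [index], true)

def scan_interval (line : List Int) : List (List Int × List Int) :=
  ((PySem.List.pyRange 0 line.length 1).foldl
    (fun s index => pvStepA s index (PySem.List.pyGetD line index 0))
    ([], [], [], false)).1

-- ===== PORT B =====
-- the indices of the zeros of line: the generator '(i for i, v in enumerate(line) if v == 0)'
def pvZeros (line : List Int) : List Int :=
  ((PySem.List.enumerate line 0).filter (fun q => q.2 == 0)).map (fun q => q.1)

-- loop body: state (result, prev); each gap wider than 1 becomes (range(prev+1,z), line[prev+1:z])
def pvStepB (line : List Int) (s : List (List Int × List Int) × Int) (z : Int) :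
    List (List Int × List Int) × Int :=
  let (res, prev) := s
  if z - prev > 1 then
    (res ++ [(PySem.List.pyRange (prev + 1) z 1,
              PySem.List.slice line (some (prev + 1)) (some z))], z)
  else (res, z)

def scan_interval_alt (line : List Int) : List (List Int × List Int) :=
  ((pvZeros line).foldl (pvStepB line) ([], -1)).1

-- ===== PRECONDITION & SPEC =====
def Spec_scan_interval (line : List Int) (out : List (List Int × List Int)) : Prop := out = scan_interval_alt line
instance (line : List Int) (out : List (List Int × List Int)) : Decidable (Spec_scan_interval line out) := by unfold Spec_scan_interval; infer_instance

-- ===== CLAIM (what is proved, stated in full; the proofs are below) =====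
def Claim_equal_scan_interval : Prop := ∀ (line : List Int), Dom_scan_interval line → Spec_scan_interval line (scan_interval line)

-- ===== LEMMAS AND PROOFS =====

-- reference recursion: runs terminated by a zero (a trailing unterminated run is dropped)
def pvSpec (i : Int) (ig g : List Int) : List Int → List (List Int × List Int)
  | [] => []
  | x :: xs =>
    if x = 0 then
      (if g.isEmpty then pvSpec (i + 1) ig g xs else (ig, g) :: pvSpec (i + 1) [] [] xs)
    else pvSpec (i + 1) (ig ++ [i]) (g ++ [x]) xs

-- ---- A-side: the indexed foldl is pvSpec ----
theorem foldA_eq_pvSpec : ∀ (suf pre : List Int) (pc : List (List Int × List Int)) (ig g : List Int),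
    ((PySem.List.pyRange (pre.length) ((pre ++ suf).length) 1).foldl
      (fun s index => pvStepA s index (PySem.List.pyGetD (pre ++ suf) index 0))
      (pc, g, ig, !g.isEmpty)).1 = pc ++ pvSpec (pre.length) ig g suf := by
  intro suf
  induction suf with
  | nil =>
    intro pre pc ig g
    simp [PySem.List.pyRange_one_eq_nil (le_refl _), pvSpec]
  | cons x suf ih =>
    intro pre pc ig g
    have hsplit : pre ++ x :: suf = (pre ++ [x]) ++ suf := by simp
    have hlt : (pre.length : Int) < ((pre ++ x :: suf).length : Int) := by
      simp [List.length_append]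
    rw [PySem.List.pyRange_one_cons hlt, List.foldl_cons]
    have hget : PySem.List.pyGetD (pre ++ x :: suf) (pre.length : Int) 0 = x := by
      rw [PySem.List.pyGetD_natCast, List.getD_append_right _ _ _ _ (Nat.le_refl _)]
      simp
    rw [hget]
    have hL1 : ((pre.length : Int) + 1) = (((pre ++ [x]).length : Nat) : Int) := by
      simp [List.length_append]
    by_cases hx : x = 0
    · by_cases hg : g.isEmpty
      · have hstep : pvStepA (pc, g, ig, !g.isEmpty) (pre.length : Int) x = (pc, g, ig, !g.isEmpty) := by
          simp [pvStepA, hx, hg]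
        rw [hstep, hsplit, hL1, ih (pre ++ [x]) pc ig g, ← hL1]
        simp [pvSpec, hx, hg]
      · have hg' : g.isEmpty = false := by simpa using hg
        have hstep : pvStepA (pc, g, ig, !g.isEmpty) (pre.length : Int) x
            = (pc ++ [(ig, g)], [], [], false) := by
          simp [pvStepA, hx, hg']
        have hih := ih (pre ++ [x]) (pc ++ [(ig, g)]) [] []
        simp only [List.isEmpty_nil, Bool.not_true] at hih
        rw [hstep, hsplit, hL1, hih, ← hL1]
        simp [pvSpec, hx, hg']
    · have hxb : (x == 0) = false := by simp [hx]
      have hstep : pvStepA (pc, g, ig, !g.isEmpty) (pre.length : Int) x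
          = (pc, g ++ [x], ig ++ [(pre.length : Int)], true) := by
        cases hg : g.isEmpty <;> simp [pvStepA, hxb]
      have hih := ih (pre ++ [x]) pc (ig ++ [(pre.length : Int)]) (g ++ [x])
      have hne : ((g ++ [x]).isEmpty) = false := by simp
      rw [hne] at hih
      simp only [Bool.not_false] at hih
      rw [hstep, hsplit, hL1, hih, ← hL1]
      simp [pvSpec, hx]

-- ---- B-side: the fused fold over the enumerated suffix is pvSpec ----
theorem foldB_eq_pvSpec (line : List Int) : ∀ (suf pre : List Int), pre ++ suf = line →
    ∀ (res : List (List Int × List Int)) (p : Int), -1 ≤ p → (p + 1).toNat ≤ pre.length →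
    (∀ v ∈ pre.drop (p + 1).toNat, v ≠ 0) →
    ((PySem.List.enumerate suf (pre.length)).foldl
      (fun s q => if q.2 == 0 then pvStepB line s q.1 else s) (res, p)).1
    = res ++ pvSpec (pre.length) (PySem.List.pyRange (p + 1) (pre.length) 1)
        (pre.drop (p + 1).toNat) suf := by
  intro suf
  induction suf with
  | nil => intro pre hline res p hp hple hnz; simp [PySem.List.enumerate_nil, pvSpec]
  | cons x suf ih =>
    intro pre hline res p hp hple hnz
    rw [PySem.List.enumerate_cons, List.foldl_cons]
    have hdrop : (pre ++ [x]).drop (p + 1).toNat = pre.drop (p + 1).toNat ++ [x] := by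
      rw [List.drop_append_of_le_length hple]
    have hlen1 : ((pre ++ [x]).length : Int) = (pre.length : Int) + 1 := by simp
    by_cases hx : x = 0
    · have hxb : ((((pre.length : Int)), x).2 == 0) = true := by simp [hx]
      simp only [hxb, if_true]
      have hglen : (pre.drop (p + 1).toNat).length = pre.length - (p + 1).toNat :=
        List.length_drop ..
      by_cases hcond : (pre.length : Int) - p > 1
      · -- gap wider than 1: the pending group is nonempty and is emitted
        have hplt : (p + 1).toNat < pre.length := by omega
        have hgne : (pre.drop (p + 1).toNat) ≠ [] := by
          intro h; rw [h] at hglen; simp at hglen; omega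
        have hstep : pvStepB line (res, p) (pre.length : Int)
            = (res ++ [(PySem.List.pyRange (p + 1) (pre.length) 1,
                PySem.List.slice line (some (p + 1)) (some (pre.length : Int)))],
               (pre.length : Int)) := by
          simp only [pvStepB]; rw [if_pos hcond]
        have hslice : PySem.List.slice line (some (p + 1)) (some (pre.length : Int))
            = pre.drop (p + 1).toNat := by
          rw [← hline, PySem.List.slice_toNat _ (by omega) (by omega)]
          rw [List.drop_append_of_le_length (by omega)]
          rw [show ((pre.length : Int)).toNat = pre.length from by omega]
          rw [List.take_append_of_le_length (by rw [hglen])]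
          rw [List.take_of_length_le (by rw [hglen])]
        have hih := ih (pre ++ [x]) (by simp [hline]) 
          (res ++ [(PySem.List.pyRange (p + 1) (pre.length) 1,
              PySem.List.slice line (some (p + 1)) (some (pre.length : Int)))])
          (pre.length) (by omega) (by simp) (by
            intro v hv
            rw [show ((pre.length : Int) + 1).toNat = pre.length + 1 by omega] at hv
            simp at hv)
        rw [hstep]
        rw [show ((pre ++ [x]).length : Int) = (pre.length : Int) + 1 from hlen1] at hih
        rw [hih]
        have hdrop1 : (pre ++ [x]).drop ((pre.length : Int) + 1).toNat = [] := by
          apply List.drop_of_length_le; simp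
        rw [hdrop1]
        have hrg : PySem.List.pyRange ((pre.length : Int) + 1) ((pre.length : Int) + 1) 1 = [] :=
          PySem.List.pyRange_one_eq_nil (le_refl _)
        rw [hrg]
        have hspec : pvSpec (pre.length) (PySem.List.pyRange (p + 1) (pre.length) 1)
            (pre.drop (p + 1).toNat) (x :: suf)
            = (PySem.List.pyRange (p + 1) (pre.length) 1, pre.drop (p + 1).toNat)
              :: pvSpec ((pre.length : Int) + 1) [] [] suf := by
          rw [pvSpec, if_pos hx, if_neg (by simp [hgne])]
        rw [hspec, hslice]
        simp
      · -- gap of width ≤ 1: the pending group is empty, nothing emitted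
        have hpeq : (p + 1).toNat = pre.length := by omega
        have hgnil : pre.drop (p + 1).toNat = [] := by
          apply List.drop_of_length_le; omega
        have hignil : PySem.List.pyRange (p + 1) (pre.length) 1 = [] :=
          PySem.List.pyRange_one_eq_nil (by omega)
        have hstep : pvStepB line (res, p) (pre.length : Int) = (res, (pre.length : Int)) := by
          simp only [pvStepB]; rw [if_neg (by omega)]
        have hih := ih (pre ++ [x]) (by simp [hline]) res (pre.length)
          (by omega) (by simp)
          (by
            intro v hv
            rw [show ((pre.length : Int) + 1).toNat = pre.length + 1 by omega] at hv
            simp at hv)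
        rw [hstep]
        rw [show ((pre ++ [x]).length : Int) = (pre.length : Int) + 1 from hlen1] at hih
        rw [hih]
        have hdrop1 : (pre ++ [x]).drop ((pre.length : Int) + 1).toNat = [] := by
          apply List.drop_of_length_le; simp
        have hrg : PySem.List.pyRange ((pre.length : Int) + 1) ((pre.length : Int) + 1) 1 = [] :=
          PySem.List.pyRange_one_eq_nil (le_refl _)
        rw [hdrop1, hrg]
        rw [pvSpec, if_pos hx, if_pos (by simp [hgnil]), hgnil, hignil]
    · have hxb : ((((pre.length : Int)), x).2 == 0) = false := by simp [hx]
      simp only [hxb, Bool.false_eq_true, if_false]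
      have hih := ih (pre ++ [x]) (by simp [hline]) res p hp
        (by simp; omega)
        (by
          rw [hdrop]
          intro v hv
          rcases List.mem_append.mp hv with h | h
          · exact hnz v h
          · simp at h; rw [h]; exact hx)
      rw [show ((pre ++ [x]).length : Int) = (pre.length : Int) + 1 from hlen1] at hih
      rw [hih, hdrop]
      rw [pvSpec, if_neg hx]
      have hrg : PySem.List.pyRange (p + 1) ((pre.length : Int) + 1) 1
          = PySem.List.pyRange (p + 1) (pre.length) 1 ++ [(pre.length : Int)] :=
        PySem.List.pyRange_one_succ_right (by omega)
      rw [hrg]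

-- ===== VERDICT (by name: the statement is the Claim_ definition above) =====
theorem scan_interval_spec : Claim_equal_scan_interval := by
  intro line _
  unfold Spec_scan_interval scan_interval scan_interval_alt pvZeros
  have hA := foldA_eq_pvSpec line [] [] [] []
  simp only [List.nil_append, List.length_nil, Nat.cast_zero, List.isEmpty_nil,
    Bool.not_true] at hA
  rw [hA]
  rw [List.foldl_map, ← PySem.List.foldl_if_eq_foldl_filter]
  have hB := foldB_eq_pvSpec line line [] rfl [] (-1) (by omega) (by simp) (by simp)
  simp only [List.length_nil, Nat.cast_zero, List.drop_nil, List.nil_append,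
    show (-1 : Int) + 1 = 0 from rfl,
    PySem.List.pyRange_one_eq_nil (le_refl (0 : Int))] at hB
  exact hB.symm
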